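-- pv_equiv track=rewrite | github.com/nebr0k/lab5_discrete-structures | main.py | createBitArray
-- ===== SOURCE A (Python) =====
-- def createBitArray(U, T):
--     result = [0] * len(U)
--     for i in range(len(U)):
--         for j in range(len(T)):
--             if T[j] == U[i]:
--                 result[i] = 1
--                 break
--     return result
-- ===== SOURCE B (Python) =====
-- def createBitArray(U, T):
--     index = {}
--     for i, u in enumerate(U):
--         index.setdefault(u, []).append(i)
--     result = [0] * len(U)
--     for t in T:
--         if t in index:
--             for i in index[t]:
--                 result[i] = 1
--     return result
-- ===== Notes on version B (the rewrite author's own statement) =====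
-- stated objective: faster
-- what changed: Instead of rescanning T for every element of U (nested loops), B builds a dict index mapping each distinct value of U to its list of positions, then makes a single pass over T marking all positions of each seen value.
import Mathlib
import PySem

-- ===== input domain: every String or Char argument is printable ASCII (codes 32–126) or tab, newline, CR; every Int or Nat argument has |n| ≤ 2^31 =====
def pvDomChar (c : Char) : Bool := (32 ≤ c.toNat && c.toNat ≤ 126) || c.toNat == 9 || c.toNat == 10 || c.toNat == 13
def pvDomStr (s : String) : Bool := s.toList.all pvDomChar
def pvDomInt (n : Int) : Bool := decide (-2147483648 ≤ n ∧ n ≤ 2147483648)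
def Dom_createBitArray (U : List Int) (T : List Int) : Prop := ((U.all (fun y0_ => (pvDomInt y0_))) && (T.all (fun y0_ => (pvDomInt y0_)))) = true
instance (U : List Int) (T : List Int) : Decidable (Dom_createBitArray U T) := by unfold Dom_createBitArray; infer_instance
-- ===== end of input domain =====

-- B replaces A's nested rescan of T for every element of U by a dict index of U's positions and a single pass over T.

-- ===== PORT A =====
-- inner loop 'for j in range(len(T)): if T[j] == U[i]: result[i] = 1; break'
def aInner (T : List Int) (u : Int) (js : List Nat) (result : List Int) (i : Nat) : List Int :=
  match js with
  | [] => result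
  | j :: rest => if T.getD j 0 == u then result.set i 1 else aInner T u rest result i

def createBitArray (U : List Int) (T : List Int) : List Int :=
  (List.range U.length).foldl
    (fun result i => aInner T (U.getD i 0) (List.range T.length) result i)
    (List.replicate U.length 0)

-- ===== PORT B =====
-- 'index = {}; for i, u in enumerate(U): index.setdefault(u, []).append(i)'
def buildIndex (U : List Int) : PySem.Dict Int (List Int) :=
  (PySem.List.enumerate U).foldl
    (fun d p => d.insert p.2 (d.getD p.2 [] ++ [p.1])) PySem.Dict.empty

-- 'result = [0]*len(U); for t in T: if t in index: for i in index[t]: result[i] = 1'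
def createBitArray_alt (U : List Int) (T : List Int) : List Int :=
  let index := buildIndex U
  T.foldl
    (fun r t =>
      match index.get? t with
      | some is => is.foldl (fun r i => PySem.List.pySetD r i 1) r
      | none => r)
    (List.replicate U.length 0)

-- ===== PRECONDITION & SPEC =====
def Spec_createBitArray (U : List Int) (T : List Int) (out : List Int) : Prop := out = createBitArray_alt U T
instance (U : List Int) (T : List Int) (out : List Int) : Decidable (Spec_createBitArray U T out) := by unfold Spec_createBitArray; infer_instance

-- ===== CLAIM (what is proved, stated in full; the proofs are below) =====
def Claim_equal_createBitArray : Prop := ∀ (U : List Int) (T : List Int), Dom_createBitArray U T → Spec_createBitArray U T (createBitArray U T)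

-- ===== LEMMAS AND PROOFS =====

theorem getD_set (r : List Int) (m k : Nat) (v : Int) :
    (r.set m v).getD k 0 = if m = k ∧ k < r.length then v else r.getD k 0 := by
  simp only [List.getD_eq_getElem?_getD, List.getElem?_set]
  split_ifs with h h1 h2 <;> simp_all

theorem foldl_length_inv {α : Type} (f : List Int → α → List Int)
    (h : ∀ r x, (f r x).length = r.length) :
    ∀ (l : List α) (r : List Int), (l.foldl f r).length = r.length := by
  intro l
  induction l with
  | nil => intro r; rfl
  | cons x l ih => intro r; rw [List.foldl_cons, ih, h]

theorem aInner_eq (T : List Int) (u : Int) (js : List Nat) (r : List Int) (i : Nat) :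
    aInner T u js r i = if js.any (fun j => T.getD j 0 == u) then r.set i 1 else r := by
  induction js with
  | nil => simp [aInner]
  | cons j rest ih =>
    simp only [aInner, ih, List.any_cons, Bool.or_eq_true]
    split_ifs with h1 h2 h3 <;> tauto

theorem any_range_getD (T : List Int) (u : Int) :
    (List.range T.length).any (fun j => T.getD j 0 == u) = decide (u ∈ T) := by
  rw [Bool.eq_iff_iff]
  simp only [List.any_eq_true, List.mem_range, beq_iff_eq, decide_eq_true_eq]
  constructor
  · rintro ⟨j, hj, he⟩
    rw [List.getD_eq_getElem _ _ hj] at he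
    exact he ▸ List.getElem_mem hj
  · intro hu
    obtain ⟨j, hj, he⟩ := List.mem_iff_getElem.mp hu
    exact ⟨j, hj, by rw [List.getD_eq_getElem _ _ hj]; exact he⟩

theorem foldl_condSet_getD (c : Nat → Bool) :
    ∀ (js : List Nat) (r : List Int) (k : Nat),
      ((js.foldl (fun r i => if c i then r.set i 1 else r) r).getD k 0)
        = if k ∈ js ∧ c k = true ∧ k < r.length then 1 else r.getD k 0 := by
  intro js
  induction js with
  | nil => intro r k; simp
  | cons j js ih =>
    intro r k
    have hlen : (if c j then r.set j 1 else r).length = r.length := by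
      split_ifs <;> simp
    rw [List.foldl_cons, ih, hlen]
    by_cases hk : k = j
    · subst hk
      by_cases hc : c k <;> by_cases hl : k < r.length <;>
        simp [hc, hl, List.mem_cons]
    · have h2 : (if c j then r.set j 1 else r).getD k 0 = r.getD k 0 := by
        split_ifs with h
        · rw [getD_set]; simp [Ne.symm hk]
        · rfl
      rw [h2]
      simp [List.mem_cons, hk]

theorem createBitArray_eq_condSet (U T : List Int) :
    createBitArray U T
      = (List.range U.length).foldl
          (fun r i => if decide (U.getD i 0 ∈ T) then r.set i 1 else r)
          (List.replicate U.length 0) := by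
  unfold createBitArray
  congr 1
  funext r i
  rw [aInner_eq, any_range_getD]

theorem A_getD (U T : List Int) (k : Nat) (hk : k < U.length) :
    (createBitArray U T).getD k 0 = if U.getD k 0 ∈ T then 1 else 0 := by
  rw [createBitArray_eq_condSet, foldl_condSet_getD]
  simp [hk]

theorem length_A (U T : List Int) : (createBitArray U T).length = U.length := by
  rw [createBitArray_eq_condSet,
    foldl_length_inv _ (fun r i => by split_ifs <;> simp)]
  simp

-- proof-side model of the dict's value lists: positions of v in U, counting from offset s
def idxsFrom (s : Int) : List Int → Int → List Int
  | [], _ => []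
  | u :: U', v => (if u = v then [s] else []) ++ idxsFrom (s + 1) U' v

theorem build_get? :
    ∀ (U : List Int) (d : PySem.Dict Int (List Int)) (s v : Int),
      ((PySem.List.enumerate U s).foldl (fun d p => d.insert p.2 (d.getD p.2 [] ++ [p.1])) d).get? v
        = match d.get? v with
          | some L => some (L ++ idxsFrom s U v)
          | none => if v ∈ U then some (idxsFrom s U v) else none := by
  intro U
  induction U with
  | nil =>
    intro d s v
    simp [PySem.List.enumerate_nil, idxsFrom]
    cases h : d.get? v <;> simp
  | cons u U' ih =>
    intro d s v
    rw [PySem.List.enumerate_cons, List.foldl_cons, ih]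
    by_cases hv : v = u
    · subst hv
      rw [PySem.Dict.get?_insert_self]
      rw [PySem.Dict.getD_eq_get?_getD]
      cases h : d.get? v with
      | some L => simp [idxsFrom, List.append_assoc]
      | none => simp [idxsFrom]
    · rw [PySem.Dict.get?_insert]
      simp only [if_neg hv]
      have hidx : idxsFrom s (u :: U') v = idxsFrom (s + 1) U' v := by
        simp [idxsFrom, Ne.symm hv]
      cases h : d.get? v with
      | some L => simp [hidx]
      | none => simp [hidx, List.mem_cons, hv]

theorem buildIndex_get? (U : List Int) (v : Int) :
    (buildIndex U).get? v = if v ∈ U then some (idxsFrom 0 U v) else none := by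
  rw [buildIndex, build_get?]
  simp [PySem.Dict.get?_empty]

theorem mem_idxsFrom :
    ∀ (U : List Int) (s v k : Int),
      k ∈ idxsFrom s U v ↔ ∃ m : Nat, m < U.length ∧ U.getD m 0 = v ∧ k = s + m := by
  intro U
  induction U with
  | nil => intro s v k; simp [idxsFrom]
  | cons u U' ih =>
    intro s v k
    simp only [idxsFrom, List.mem_append, ih]
    constructor
    · rintro (h | ⟨m, hm, he, hk⟩)
      · split_ifs at h with hu
        · simp at h
          exact ⟨0, by simp, by simpa [hu], by omega⟩
        · simp at h
      · exact ⟨m + 1, by simpa using hm, by simpa using he, by push_cast; omega⟩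
    · rintro ⟨m, hm, he, hk⟩
      cases m with
      | zero =>
        left
        simp at he
        simp [he, hk]
      | succ m =>
        right
        exact ⟨m, by simpa using hm, by simpa using he, by push_cast at hk ⊢; omega⟩

theorem setAll_getD :
    ∀ (is : List Int) (r : List Int) (k : Nat), (∀ i ∈ is, 0 ≤ i) →
      ((is.foldl (fun r i => PySem.List.pySetD r i 1) r).getD k 0)
        = if (k : Int) ∈ is ∧ k < r.length then 1 else r.getD k 0 := by
  intro is
  induction is with
  | nil => intro r k _; simp
  | cons i is ih =>
    intro r k hpos
    have hi : 0 ≤ i := hpos i (List.mem_cons_self ..)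
    have hset : PySem.List.pySetD r i 1 = r.set i.toNat 1 :=
      PySem.List.pySetD_of_nonneg (i := i) (v := 1) (xs := r) hi
    rw [List.foldl_cons, ih _ _ (fun j hj => hpos j (List.mem_cons_of_mem _ hj)), hset]
    by_cases hk : (k : Int) = i
    · have : i.toNat = k := by omega
      subst this
      by_cases hl : i.toNat < r.length <;>
        simp [hk, hl, List.length_set]
    · have hne : i.toNat ≠ k := by omega
      rw [List.length_set, getD_set]
      simp [hne, List.mem_cons, hk]

theorem getD_mem (U : List Int) (k : Nat) (hk : k < U.length) : U.getD k 0 ∈ U := by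
  rw [List.getD_eq_getElem _ _ hk]; exact List.getElem_mem hk

theorem setAll_length (is : List Int) (r : List Int) :
    (is.foldl (fun r i => PySem.List.pySetD r i 1) r).length = r.length :=
  foldl_length_inv _ (fun r i => PySem.List.length_pySetD ..) is r

theorem B_fold (U : List Int) :
    ∀ (T' : List Int) (r : List Int) (k : Nat), r.length = U.length →
      ((T'.foldl
          (fun r t =>
            match (buildIndex U).get? t with
            | some is => is.foldl (fun r i => PySem.List.pySetD r i 1) r
            | none => r) r).getD k 0)
        = if U.getD k 0 ∈ T' ∧ k < U.length then 1 else r.getD k 0 := by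
  intro T'
  induction T' with
  | nil => intro r k _; simp
  | cons t T' ih =>
    intro r k hlen
    rw [List.foldl_cons]
    set r1 := (match (buildIndex U).get? t with
            | some is => is.foldl (fun r i => PySem.List.pySetD r i 1) r
            | none => r) with hr1
    have hlen1 : r1.length = U.length := by
      rw [hr1]
      cases h : (buildIndex U).get? t with
      | none => simpa using hlen
      | some is => simp [setAll_length, hlen]
    rw [ih r1 k hlen1]
    have hget : r1.getD k 0 = if U.getD k 0 = t ∧ k < U.length then 1 else r.getD k 0 := by
      rw [hr1]
      by_cases ht : t ∈ U
      · rw [buildIndex_get?, if_pos ht]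
        simp only []
        have hnn : ∀ i ∈ idxsFrom 0 U t, (0 : Int) ≤ i := by
          intro i hi
          obtain ⟨m, _, _, he⟩ := (mem_idxsFrom U 0 t i).mp hi
          omega
        rw [setAll_getD _ _ _ hnn, hlen]
        have hiff : ((k : Int) ∈ idxsFrom 0 U t ∧ k < U.length)
            ↔ (U.getD k 0 = t ∧ k < U.length) := by
          rw [mem_idxsFrom]
          constructor
          · rintro ⟨⟨m, hm, he, hkm⟩, hk⟩
            have : m = k := by omega
            subst this; exact ⟨he, hk⟩
          · rintro ⟨he, hk⟩
            exact ⟨⟨k, hk, he, by omega⟩, hk⟩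
        split_ifs with h1 h2 h2 <;>
          first | rfl | (exact absurd (hiff.mp h1) h2) | (exact absurd (hiff.mpr h2) h1)
      · rw [buildIndex_get?, if_neg ht]
        simp only []
        split_ifs with h
        · exact absurd (h.1 ▸ getD_mem U k h.2) ht
        · rfl
    rw [hget]
    simp only [List.mem_cons]
    split_ifs <;> tauto

theorem B_getD (U T : List Int) (k : Nat) (hk : k < U.length) :
    (createBitArray_alt U T).getD k 0 = if U.getD k 0 ∈ T then 1 else 0 := by
  unfold createBitArray_alt
  rw [B_fold U T _ k (by simp)]
  simp [hk]

theorem length_B (U T : List Int) : (createBitArray_alt U T).length = U.length := by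
  unfold createBitArray_alt
  rw [foldl_length_inv _ (fun r t => by
    cases h : (buildIndex U).get? t <;> simp [setAll_length])]
  simp

-- ===== VERDICT (by name: the statement is the Claim_ definition above) =====
theorem createBitArray_spec : Claim_equal_createBitArray := by
  intro U T _
  unfold Spec_createBitArray
  apply List.ext_getElem (by rw [length_A, length_B])
  intro k h1 h2
  have hk : k < U.length := by rw [length_A] at h1; exact h1
  rw [← List.getD_eq_getElem _ 0 h1, ← List.getD_eq_getElem _ 0 h2,
    A_getD U T k hk, B_getD U T k hk]
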